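-- pv_equiv track=rewrite | github.com/fishnchips-basecaller/fishnchips | utils/assembler.py | _find_alignment_index
-- ===== SOURCE A (Python) =====
-- from itertools import zip_longest
--
-- def _find_alignment_index(seq_list, seq_to_align):
--   if(len(seq_list) == 0):
--     return 0
--
--   # alignment_from = _get_closest_index(seq_list)-len(seq_to_align)+1 # returns the smallest `index` in the context window
--   alignment_from = _get_closest_index(seq_list)+1 # returns the smallest `index` in the context window
--   alignment_to = _get_furthest_index(seq_list)-1 # returns the furthest away character
--
--   max_score = 0
--   max_score_index = alignment_to
--
--   for i in range(alignment_from, alignment_to):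
--     score = _calc_score(seq_list, seq_to_align, i)
--     if(score > max_score):
--       max_score, max_score_index = score, i
--   return max_score_index
--
-- def _calc_score(seq_list, seq_to_align, index):
--   seq_list = seq_list.copy()
--
--   min_in_list = min(a for (a,_) in seq_list)
--   min_offset = min(min_in_list, index)
--
--   seq_list = [(a-min_offset, b) for (a,b) in seq_list]
--   index -= min_offset
--
--   # transforms into relative padded strings
--   padded_seq_list = _pad_seq_list(seq_list)
--   seq_to_align = " "*index+seq_to_align
--
--   # zip them for count(), if only one then just make lists of 1
--   if len(padded_seq_list) > 1:
--       zipped_list = list(zip_longest(*padded_seq_list, fillvalue=" "))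
--   else:
--       zipped_list = [[a] for a in padded_seq_list[0]]
--
--   counts = list(map(lambda x: x[1].count(x[0]) if x[0] != " " else 0, zip(seq_to_align, zipped_list)))
--   return sum(counts[index:])
--
-- def _get_furthest_index(seq_list):
--     return max([i+len(l) for (i,l) in seq_list])
--
-- def _get_closest_index(seq_list):
--     return min([i for (i,l) in seq_list])
--
-- def _pad_seq_list(seq_list):
--   return [" "*a+b for (a,b) in seq_list]
-- ===== SOURCE B (Python) =====
-- def _find_alignment_index(seq_list, seq_to_align):
--   # Precompute, once, how many stored sequences put character c in absolute
--   # column j (a dict keyed by (j, c)); a candidate shift is then scored with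
--   # one dict lookup per overlapping column -- no padded strings, no column
--   # transpose, no per-column count() per shift.
--   if not seq_list:
--     return 0
--   lo = min(a for a, _ in seq_list)
--   hi = max(a + len(b) for a, b in seq_list)
--   cnt = {}
--   for a, b in seq_list:
--     for k, c in enumerate(b):
--       key = (a + k, c)
--       cnt[key] = cnt.get(key, 0) + 1
--   m = len(seq_to_align)
--   best_score, best_index = 0, hi - 1
--   for i in range(lo + 1, hi - 1):
--     s = 0
--     for j in range(i, min(hi, i + m)):
--       c = seq_to_align[j - i]
--       if c != ' ':
--         s += cnt.get((j, c), 0)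
--     if s > best_score:
--       best_score, best_index = s, i
--   return best_index
-- ===== Notes on version B (the rewrite author's own statement) =====
-- stated objective: faster
-- what changed: B precomputes a single (column, char) -> occurrence-count table over the stored sequences once and scores each candidate shift with one dict lookup per overlapping column, where A rebuilds space-padded strings, a zip_longest column transpose and a per-column str.count for every shift.
import Mathlib
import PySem

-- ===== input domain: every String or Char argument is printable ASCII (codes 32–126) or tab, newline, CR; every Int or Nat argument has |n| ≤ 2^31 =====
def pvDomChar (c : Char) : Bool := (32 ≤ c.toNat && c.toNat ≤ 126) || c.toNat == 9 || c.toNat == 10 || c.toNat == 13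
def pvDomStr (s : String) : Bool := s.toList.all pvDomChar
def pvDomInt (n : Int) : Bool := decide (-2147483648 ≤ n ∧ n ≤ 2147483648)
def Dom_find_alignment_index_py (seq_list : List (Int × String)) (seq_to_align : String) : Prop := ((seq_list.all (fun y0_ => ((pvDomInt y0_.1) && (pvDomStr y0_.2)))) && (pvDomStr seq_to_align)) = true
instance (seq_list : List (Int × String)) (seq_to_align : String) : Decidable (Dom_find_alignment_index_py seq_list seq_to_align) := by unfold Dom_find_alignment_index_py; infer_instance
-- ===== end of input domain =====

-- B precomputes one (column, char) -> count table and scores each candidate shift with one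
-- lookup per overlapping column, replacing A's per-shift padded strings + zip_longest column
-- transpose + per-column count() (objective: faster; same argmax selection, proved equal).

-- ===== PORT A =====
-- _get_closest_index: min([i for (i,l) in seq_list]); min() raises on [] — every caller guards, .getD 0 unreachable
def pvGetClosest (seq_list : List (Int × String)) : Int :=
  (PySem.List.min? (seq_list.map (fun x => x.1)) (fun x => x)).getD 0

-- _get_furthest_index: max([i+len(l) for (i,l) in seq_list]); same unreachable .getD 0
def pvGetFurthest (seq_list : List (Int × String)) : Int :=
  (PySem.List.max? (seq_list.map (fun x => x.1 + PySem.Str.len x.2)) (fun x => x)).getD 0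

-- _pad_seq_list: [" "*a+b for (a,b) in seq_list]  (" "*a is empty for a < 0 = replicate a.toNat; strings as char lists)
def pvPadSeqList (seq_list : List (Int × List Char)) : List (List Char) :=
  seq_list.map (fun ab => List.replicate ab.1.toNat ' ' ++ ab.2)

-- exact model of list(zip_longest(*rows, fillvalue=' ')): the p-th column of rows, for p < max row length
def pvZipLongest (rows : List (List Char)) : List (List Char) :=
  (List.range (rows.foldl (fun m r => max m r.length) 0)).map
    (fun p => rows.map (fun r => r.getD p ' '))

-- _calc_score, transliterated (strings handled as their char lists)
def pvCalcScore (seq_list0 : List (Int × String)) (seq_to_align : String) (index0 : Int) : Int :=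
  let min_in_list := (PySem.List.min? (seq_list0.map (fun x => x.1)) (fun x => x)).getD 0  -- min(a for (a,_) in …); raises on [], callers guard
  let min_offset := min min_in_list index0
  let seq_list := seq_list0.map (fun ab => (ab.1 - min_offset, ab.2.toList))
  let index := index0 - min_offset
  let padded := pvPadSeqList seq_list
  let seq := List.replicate index.toNat ' ' ++ seq_to_align.toList   -- " "*index + seq_to_align
  let zipped := if padded.length > 1 then pvZipLongest padded
                else (padded.getD 0 []).map (fun a => [a])           -- [[a] for a in padded_seq_list[0]]
  let counts := (seq.zip zipped).map (fun x => if x.1 ≠ ' ' then (x.2.count x.1 : Int) else 0)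
  (PySem.List.slice counts (some index) none).sum                    -- sum(counts[index:])

def find_alignment_index_py (seq_list : List (Int × String)) (seq_to_align : String) : Int :=
  if seq_list.length = 0 then 0
  else
    let alignment_from := pvGetClosest seq_list + 1
    let alignment_to := pvGetFurthest seq_list - 1
    let st := (PySem.List.pyRange alignment_from alignment_to 1).foldl
      (fun (st : Int × Int) i =>
        let score := pvCalcScore seq_list seq_to_align i
        if score > st.1 then (score, i) else st) (0, alignment_to)
    st.2

-- ===== PORT B =====
def find_alignment_index_py_alt (seq_list : List (Int × String)) (seq_to_align : String) : Int :=
  if seq_list.isEmpty then 0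
  else
    let lo := (PySem.List.min? (seq_list.map (fun x => x.1)) (fun x => x)).getD 0
    let hi := (PySem.List.max? (seq_list.map (fun x => x.1 + PySem.Str.len x.2)) (fun x => x)).getD 0
    let cnt := seq_list.foldl (fun (d : PySem.Dict (Int × Char) Int) ab =>
        (PySem.List.enumerate ab.2.toList).foldl
          (fun d kc => d.insert (ab.1 + kc.1, kc.2) (d.getD (ab.1 + kc.1, kc.2) 0 + 1)) d)
      PySem.Dict.empty
    let m : Int := PySem.Str.len seq_to_align
    let st := (PySem.List.pyRange (lo + 1) (hi - 1) 1).foldl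
      (fun (st : Int × Int) i =>
        let s := (PySem.List.pyRange i (min hi (i + m)) 1).foldl
          (fun (s : Int) j =>
            -- seq_to_align[j - i]: in range by the loop bounds, so getD with ' ' is exact
            let c := PySem.List.pyGetD seq_to_align.toList (j - i) ' '
            if c ≠ ' ' then s + cnt.getD (j, c) 0 else s) 0
        if s > st.1 then (s, i) else st) (0, hi - 1)
    st.2

-- ===== PRECONDITION & SPEC =====
def Spec_find_alignment_index_py (seq_list : List (Int × String)) (seq_to_align : String) (out : Int) : Prop := out = find_alignment_index_py_alt seq_list seq_to_align
instance (seq_list : List (Int × String)) (seq_to_align : String) (out : Int) : Decidable (Spec_find_alignment_index_py seq_list seq_to_align out) := by unfold Spec_find_alignment_index_py; infer_instance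

-- ===== CLAIM (what is proved, stated in full; the proofs are below) =====
def Claim_equal_find_alignment_index_py : Prop := ∀ (seq_list : List (Int × String)) (seq_to_align : String), Dom_find_alignment_index_py seq_list seq_to_align → Spec_find_alignment_index_py seq_list seq_to_align (find_alignment_index_py seq_list seq_to_align)


-- ===== LEMMAS AND PROOFS =====

-- the per-cell 0/1 contribution: seq char k (shifted by d columns) matches row r
def pvE (w : List Char) (d k : Nat) (r : List Char) : Int :=
  if w.getD k ' ' ≠ ' ' ∧ r.getD (d + k) ' ' = w.getD k ' ' then 1 else 0

-- the padded rows of A's _calc_score when min_offset = lo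
def pvP (l : List (Int × String)) (lo : Int) : List (List Char) :=
  l.map (fun ab => List.replicate (ab.1 - lo).toNat ' ' ++ ab.2.toList)

-- the number of columns of A's zipped list
def pvM (l : List (Int × String)) (lo : Int) : Nat :=
  (pvP l lo).foldl (fun m r => max m r.length) 0

theorem pv_getD_range (r : List Char) :
    (List.range r.length).map (fun p => r.getD p ' ') = r := by
  apply List.ext_getElem
  · simp
  · intro k h1 h2; simp [List.getD_eq_getElem?_getD, List.getElem?_eq_getElem h2]

theorem pv_pad_getD (da : Nat) (b : List Char) (q : Nat) :
    (List.replicate da ' ' ++ b).getD q ' ' = if q < da then ' ' else b.getD (q - da) ' ' := by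
  induction da generalizing q with
  | zero => simp
  | succ d ih =>
    cases q with
    | zero => simp [List.replicate_succ]
    | succ q => simpa [List.replicate_succ] using ih q

theorem pv_zip_map (xs : List Char) (ys : List (List Char)) (f : Char × List Char → Int) :
    (xs.zip ys).map f
      = (List.range (min xs.length ys.length)).map (fun p => f (xs.getD p ' ', ys.getD p [])) := by
  induction xs generalizing ys with
  | nil => simp
  | cons x xs ih =>
    cases ys with
    | nil => simp
    | cons y ys =>
      simp only [List.zip_cons_cons, List.map_cons, List.length_cons,
        Nat.succ_min_succ, List.range_succ_eq_map, List.map_map]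
      simp only [Function.comp_def, List.getD_cons_succ, List.getD_cons_zero]
      rw [ih ys]

theorem pv_drop_map_range {α : Type} (L d : Nat) (g : Nat → α) :
    (((List.range L).map g).drop d) = (List.range (L - d)).map (fun k => g (d + k)) := by
  by_cases h : d ≤ L
  · rw [show L = d + (L - d) by omega, List.range_add, List.map_append]
    rw [List.drop_left' (by simp), List.map_map, Nat.add_sub_cancel_left]
    rfl
  · rw [List.drop_eq_nil_of_le (by simp; omega), show L - d = 0 by omega]
    simp

theorem pv_count_expand (c : Char) (P : List (List Char)) (g : List Char → Char) :
    (if c ≠ ' ' then ((P.map g).count c : Int) else 0)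
      = (P.map (fun r => if c ≠ ' ' ∧ g r = c then 1 else 0)).sum := by
  by_cases hc : c = ' '
  · simp [hc]
  · simp only [hc, ne_eq, not_false_eq_true, true_and, if_pos]
    have := PySem.List.sum_map_ite_one_zero (fun r => decide (g r = c)) P
    simp only [decide_eq_true_eq] at this
    rw [this, List.count, List.countP_map]
    congr 1

theorem pv_calc_norm (l : List (Int × String)) (s : String) (lo i : Int)
    (hlo : PySem.List.min? (l.map (fun x => x.1)) (fun x => x) = some lo) (hli : lo ≤ i) :
    pvCalcScore l s i =
      ((List.range (min s.toList.length (pvM l lo - (i - lo).toNat))).map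
        (fun k => ((pvP l lo).map (fun r => pvE s.toList (i - lo).toNat k r)).sum)).sum := by
  have hne : l ≠ [] := by
    intro h
    rw [h] at hlo
    simp [show PySem.List.min? ([] : List Int) (fun x => x) = none from rfl] at hlo
  have hmin : min lo i = lo := min_eq_left hli
  have hP : pvPadSeqList (l.map (fun ab => (ab.1 - lo, ab.2.toList))) = pvP l lo := by
    simp [pvPadSeqList, pvP, List.map_map]
  simp only [pvCalcScore, hlo, Option.getD_some, hmin, hP]
  have hz : (if (pvP l lo).length > 1 then pvZipLongest (pvP l lo)
        else ((pvP l lo).getD 0 []).map (fun a => [a]))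
      = (List.range (pvM l lo)).map (fun p => (pvP l lo).map (fun r => r.getD p ' ')) := by
    by_cases hlen : (pvP l lo).length > 1
    · rw [if_pos hlen]; rfl
    · rw [if_neg hlen]
      have hPne : pvP l lo ≠ [] := by simp [pvP, hne]
      obtain ⟨r, hr⟩ : ∃ r, pvP l lo = [r] := by
        match h : pvP l lo, hPne, hlen with
        | [r], _, _ => exact ⟨r, rfl⟩
        | r :: r' :: t, _, hlen => simp at hlen
      rw [hr]
      have hM : pvM l lo = r.length := by
        unfold pvM; rw [hr]; simp
      rw [hM, show (([r] : List (List Char)).getD 0 []) = r from rfl]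
      conv_lhs => rw [← pv_getD_range r, List.map_map]
      rfl
  rw [hz]
  rw [pv_zip_map]
  rw [PySem.List.slice_from _ (by omega)]
  rw [pv_drop_map_range]
  simp only [List.length_append, List.length_replicate, List.length_map, List.length_range]
  rw [show min ((i - lo).toNat + s.toList.length) (pvM l lo) - (i - lo).toNat
        = min s.toList.length (pvM l lo - (i - lo).toNat) by omega]
  apply congrArg
  apply List.map_congr_left
  intro k hk
  simp only [List.mem_range] at hk
  have hk1 : k < s.toList.length := lt_of_lt_of_le hk (min_le_left _ _)
  have hk2 : (i - lo).toNat + k < pvM l lo := by omega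
  have h1 : (List.replicate (i - lo).toNat ' ' ++ s.toList).getD ((i - lo).toNat + k) ' '
      = s.toList.getD k ' ' := by
    rw [pv_pad_getD]
    simp
  have h2 : ((List.range (pvM l lo)).map
        (fun p => (pvP l lo).map (fun r => r.getD p ' '))).getD ((i - lo).toNat + k) []
      = (pvP l lo).map (fun r => r.getD ((i - lo).toNat + k) ' ') := by
    simp [List.getD_eq_getElem?_getD, List.getElem?_range hk2]
  rw [h1, h2]
  exact pv_count_expand _ _ _

-- all (column, char) cells occupied by the stored sequences (B's table counts exactly these)
def pvKeys (l : List (Int × String)) : List (Int × Char) :=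
  l.flatMap (fun ab => (PySem.List.enumerate ab.2.toList).map (fun kc => (ab.1 + kc.1, kc.2)))

theorem pv_count_flatMap (l : List (Int × String)) (g : (Int × String) → List (Int × Char))
    (key : Int × Char) :
    (((l.flatMap g).count key : Int)) = (l.map (fun ab => ((g ab).count key : Int))).sum := by
  induction l with
  | nil => simp
  | cons ab t ih => simp [List.count_append, ih]

theorem pv_keys_count_zero (l : List (Int × String)) (hi : Int)
    (hbound : ∀ ab ∈ l, ab.1 + (ab.2.toList.length : Int) ≤ hi) (j : Int) (c : Char)
    (hj : hi ≤ j) : (pvKeys l).count (j, c) = 0 := by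
  rw [List.count_eq_zero]
  intro hmem
  simp only [pvKeys, List.mem_flatMap, List.mem_map] at hmem
  obtain ⟨ab, hab, kc, hkc, hkey⟩ := hmem
  rw [PySem.List.mem_enumerate_iff] at hkc
  obtain ⟨kk, hkk, rfl⟩ := hkc
  have hb := hbound ab hab
  injection hkey with h1 h2
  simp only at h1
  omega

theorem pv_count_enum_map (b : List Char) (a : Int) (c : Char) : ∀ (s j : Int),
    ((PySem.List.enumerate b s).map (fun kc => (a + kc.1, kc.2))).count (j, c)
      = if a + s ≤ j ∧ j < a + s + b.length ∧ b.getD (j - a - s).toNat ' ' = c then 1 else 0 := by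
  induction b with
  | nil =>
    intro s j
    rw [if_neg (by rintro ⟨h1, h2, -⟩; simp at h2; omega)]
    simp [PySem.List.enumerate]
  | cons x xs ih =>
    intro s j
    rw [PySem.List.enumerate_cons, List.map_cons, List.count_cons, ih (s + 1) j]
    simp only [beq_iff_eq, Prod.mk.injEq]
    by_cases hj : j = a + s
    · subst hj
      rw [if_neg (show ¬(a + (s + 1) ≤ a + s ∧ a + s < a + (s + 1) + (xs.length : Int) ∧
          xs.getD (a + s - a - (s + 1)).toNat ' ' = c) from by rintro ⟨u, -, -⟩; omega)]
      by_cases hx : x = c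
      · rw [if_pos (show a + s = a + s ∧ x = c from ⟨rfl, hx⟩),
          if_pos (show a + s ≤ a + s ∧ a + s < a + s + ((x :: xs).length : Int) ∧
            (x :: xs).getD (a + s - a - s).toNat ' ' = c from
            ⟨by omega, by simp only [List.length_cons]; push_cast; omega,
              by rw [show a + s - a - s = 0 by omega]; simpa using hx⟩)]
      · rw [if_neg (show ¬(a + s = a + s ∧ x = c) from by rintro ⟨-, hh⟩; exact hx hh),
          if_neg (show ¬(a + s ≤ a + s ∧ a + s < a + s + ((x :: xs).length : Int) ∧
            (x :: xs).getD (a + s - a - s).toNat ' ' = c) from by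
            rintro ⟨-, -, h3⟩; rw [show a + s - a - s = 0 by omega] at h3
            simp at h3; exact hx h3)]
    · rw [if_neg (show ¬(a + s = j ∧ x = c) from by rintro ⟨hh, -⟩; exact hj hh.symm),
        Nat.add_zero]
      by_cases h1 : a + s + 1 ≤ j
      · have hget : (x :: xs).getD (j - a - s).toNat ' ' = xs.getD (j - a - (s + 1)).toNat ' ' := by
          rw [show (j - a - s).toNat = (j - a - (s + 1)).toNat + 1 by omega, List.getD_cons_succ]
        rw [hget]
        refine if_congr ?_ rfl rfl
        constructor
        · rintro ⟨u, v, hw⟩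
          refine ⟨by omega, ?_, hw⟩
          simp only [List.length_cons]
          push_cast
          omega
        · rintro ⟨u, v, hw⟩
          refine ⟨by omega, ?_, hw⟩
          simp only [List.length_cons] at v
          push_cast at v ⊢
          omega
      · rw [if_neg (show ¬(a + (s + 1) ≤ j ∧ j < a + (s + 1) + (xs.length : Int) ∧
            xs.getD (j - a - (s + 1)).toNat ' ' = c) from by rintro ⟨u, -, -⟩; omega),
          if_neg (show ¬(a + s ≤ j ∧ j < a + s + ((x :: xs).length : Int) ∧
            (x :: xs).getD (j - a - s).toNat ' ' = c) from by rintro ⟨u, -, -⟩; omega)]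

-- a single cell of A's padded matrix equals the count contributed by that row to B's table
theorem pv_cell (w b : List Char) (lo a i : Int) (k : Nat)
    (hla : lo ≤ a) (hli : lo ≤ i) :
    pvE w (i - lo).toNat k (List.replicate (a - lo).toNat ' ' ++ b)
      = if w.getD k ' ' ≠ ' ' then
          (((PySem.List.enumerate b).map (fun kc => (a + kc.1, kc.2))).count
            (i + (k : Int), w.getD k ' ') : Int)
        else 0 := by
  by_cases hc : w.getD k ' ' = ' '
  · unfold pvE
    rw [if_neg (by rintro ⟨h, -⟩; exact h hc), if_neg (by simp only [ne_eq, not_not]; exact hc)]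
  · rw [if_pos hc, show PySem.List.enumerate b = PySem.List.enumerate b 0 from rfl,
      pv_count_enum_map]
    unfold pvE
    have hpad := pv_pad_getD ((a - lo).toNat) b ((i - lo).toNat + k)
    by_cases h1 : a ≤ i + (k : Int)
    · rw [if_neg (by omega)] at hpad
      by_cases h2 : i + (k : Int) < a + (b.length : Int)
      · rw [show (i - lo).toNat + k - (a - lo).toNat = (i + (k : Int) - a - 0).toNat by omega] at hpad
        by_cases h3 : b.getD (i + (k : Int) - a - 0).toNat ' ' = w.getD k ' '
        · rw [if_pos ⟨hc, by rw [hpad]; exact h3⟩, if_pos ⟨by omega, by omega, h3⟩]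
          norm_num
        · rw [if_neg (by rintro ⟨-, hh⟩; rw [hpad] at hh; exact h3 hh),
            if_neg (by rintro ⟨-, -, hh⟩; exact h3 hh)]
          norm_num
      · have hb0 : b.getD ((i - lo).toNat + k - (a - lo).toNat) ' ' = ' ' :=
          List.getD_eq_default _ _ (by omega)
        rw [hb0] at hpad
        rw [if_neg (by rintro ⟨hh, hh2⟩; rw [hpad] at hh2; exact hh hh2.symm),
          if_neg (by rintro ⟨-, hh, -⟩; omega)]
        norm_num
    · rw [if_pos (by omega)] at hpad
      rw [if_neg (by rintro ⟨hh, hh2⟩; rw [hpad] at hh2; exact hh hh2.symm),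
        if_neg (by rintro ⟨hh, -, -⟩; omega)]
      norm_num

theorem pv_cnt_getD (l : List (Int × String)) :
    ∀ (d : PySem.Dict (Int × Char) Int) (key : Int × Char),
    (l.foldl (fun d ab => (PySem.List.enumerate ab.2.toList).foldl
        (fun d kc => d.insert (ab.1 + kc.1, kc.2) (d.getD (ab.1 + kc.1, kc.2) 0 + 1)) d) d).getD key 0
      = d.getD key 0 + ((pvKeys l).count key : Int) := by
  induction l with
  | nil => intro d key; simp [pvKeys]
  | cons ab t ih =>
    intro d key
    rw [List.foldl_cons, ih]
    have hinner : (PySem.List.enumerate ab.2.toList).foldl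
        (fun d kc => d.insert (ab.1 + kc.1, kc.2) (d.getD (ab.1 + kc.1, kc.2) 0 + 1)) d
        = ((PySem.List.enumerate ab.2.toList).map (fun kc => (ab.1 + kc.1, kc.2))).foldl
          (fun d x => d.insert x (d.getD x 0 + 1)) d := by
      rw [List.foldl_map]
    rw [hinner, PySem.Dict.getD_foldl_insert_add_one]
    have : pvKeys (ab :: t)
        = (PySem.List.enumerate ab.2.toList).map (fun kc => (ab.1 + kc.1, kc.2)) ++ pvKeys t := by
      simp [pvKeys]
    rw [this, List.count_append]
    push_cast
    ring

theorem pv_main : ∀ (seq_list : List (Int × String)) (seq_to_align : String),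
    find_alignment_index_py seq_list seq_to_align = find_alignment_index_py_alt seq_list seq_to_align := by
  intro l s
  match l with
  | [] => rfl
  | ab :: t =>
    set l := ab :: t with hl
    obtain ⟨lo, hlo⟩ : ∃ lo, PySem.List.min? (l.map (fun x => x.1)) (fun x => x) = some lo := by
      cases h : PySem.List.min? (l.map (fun x => x.1)) (fun x => x) with
      | none => rw [PySem.List.min?_eq_none_iff] at h; simp [hl] at h
      | some lo => exact ⟨lo, rfl⟩
    obtain ⟨hi, hhi⟩ : ∃ hi, PySem.List.max? (l.map (fun x => x.1 + PySem.Str.len x.2))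
        (fun x => x) = some hi := by
      cases h : PySem.List.max? (l.map (fun x => x.1 + PySem.Str.len x.2)) (fun x => x) with
      | none => rw [PySem.List.max?_eq_none_iff] at h; simp [hl] at h
      | some hi => exact ⟨hi, rfl⟩
    have hbound : ∀ ab ∈ l, ab.1 + (ab.2.toList.length : Int) ≤ hi := by
      intro ab2 hab2
      have := PySem.List.max?_isMax hhi (ab2.1 + PySem.Str.len ab2.2) (List.mem_map_of_mem hab2)
      rw [PySem.Str.len_eq] at this
      exact this
    unfold find_alignment_index_py find_alignment_index_py_alt pvGetClosest pvGetFurthest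
    rw [if_neg (by simp [hl]), if_neg (by simp [hl])]
    simp only [hlo, hhi, Option.getD_some]
    simp only [PySem.Str.len_eq]
    set C := l.foldl (fun (d : PySem.Dict (Int × Char) Int) ab =>
        (PySem.List.enumerate ab.2.toList).foldl
          (fun d kc => d.insert (ab.1 + kc.1, kc.2) (d.getD (ab.1 + kc.1, kc.2) 0 + 1)) d)
      PySem.Dict.empty with hC
    have hcnt : ∀ key, C.getD key 0 = ((pvKeys l).count key : Int) := by
      intro key
      rw [hC, pv_cnt_getD]
      simp [PySem.Dict.getD_empty]
    apply congrArg
    apply PySem.List.foldl_congr_mem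
    intro acc x hx
    rw [PySem.List.mem_pyRange_one] at hx
    have hli : lo ≤ x := by omega
    suffices hsc : pvCalcScore l s x
        = (PySem.List.pyRange x (min hi (x + (s.toList.length : Int))) 1).foldl
            (fun (s0 : Int) j =>
              if PySem.List.pyGetD s.toList (j - x) ' ' ≠ ' '
              then s0 + C.getD (j, PySem.List.pyGetD s.toList (j - x) ' ') 0 else s0) 0 by
      rw [hsc]
    have hB : (PySem.List.pyRange x (min hi (x + (s.toList.length : Int))) 1).foldl
          (fun (s0 : Int) j =>
            if PySem.List.pyGetD s.toList (j - x) ' ' ≠ ' '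
            then s0 + C.getD (j, PySem.List.pyGetD s.toList (j - x) ' ') 0 else s0) 0
        = ((List.range s.toList.length).map (fun k =>
            if s.toList.getD k ' ' ≠ ' '
            then ((pvKeys l).count (x + (k : Int), s.toList.getD k ' ') : Int) else 0)).sum := by
      rw [PySem.List.foldl_congr_mem _ _
        (fun (s0 : Int) (j : Int) => s0 + (if PySem.List.pyGetD s.toList (j - x) ' ' ≠ ' '
          then C.getD (j, PySem.List.pyGetD s.toList (j - x) ' ') 0 else 0)) _ ?_]
      · rw [PySem.List.foldl_add, zero_add, PySem.List.pyRange_one, List.map_map]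
        -- re-index the column j = x + k and extend to all read positions (extra counts are 0)
        set e := min hi (x + (s.toList.length : Int)) with he
        set T := (e - x).toNat with hT
        have hTm : T ≤ s.toList.length := by rw [hT, he]; omega
        rw [show s.toList.length = T + (s.toList.length - T) by omega, List.range_add,
          List.map_append, List.sum_append]
        have hz : (List.map (fun k =>
              if s.toList.getD k ' ' ≠ ' '
              then ((pvKeys l).count (x + (k : Int), s.toList.getD k ' ') : Int) else 0)
            ((List.range (s.toList.length - T)).map (fun j => T + j))).sum = 0 := by
          apply List.sum_eq_zero
          intro v hv
          simp only [List.map_map, List.mem_map, List.mem_range, Function.comp_def] at hv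
          obtain ⟨jj, hjj, rfl⟩ := hv
          rw [pv_keys_count_zero l hi hbound _ _ (by rw [hT, he] at *; omega)]
          simp
        rw [hz, add_zero]
        apply congrArg
        apply List.map_congr_left
        intro k hk
        simp only [List.mem_range] at hk
        simp only [Function.comp_apply, add_sub_cancel_left, PySem.List.pyGetD_natCast, hcnt]
      · intro acc2 j _
        by_cases hc2 : PySem.List.pyGetD s.toList (j - x) ' ' = ' '
        · simp [hc2]
        · simp [hc2]
    have hA : pvCalcScore l s x
        = ((List.range s.toList.length).map (fun k =>
            if s.toList.getD k ' ' ≠ ' '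
            then ((pvKeys l).count (x + (k : Int), s.toList.getD k ' ') : Int) else 0)).sum := by
      rw [pv_calc_norm l s lo x hlo hli]
      have hrow : ∀ r ∈ pvP l lo, r.length ≤ pvM l lo := by
        intro r hr
        exact (PySem.List.le_foldl_max_nat (pvP l lo) List.length 0).2 r hr
      have hext : ((List.range (min s.toList.length (pvM l lo - (x - lo).toNat))).map
            (fun k => ((pvP l lo).map (fun r => pvE s.toList (x - lo).toNat k r)).sum)).sum
          = ((List.range s.toList.length).map
            (fun k => ((pvP l lo).map (fun r => pvE s.toList (x - lo).toNat k r)).sum)).sum := by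
        rcases Nat.le_total s.toList.length (pvM l lo - (x - lo).toNat) with hle | hle
        · rw [min_eq_left hle]
        · rw [min_eq_right hle,
            show s.toList.length = (pvM l lo - (x - lo).toNat)
              + (s.toList.length - (pvM l lo - (x - lo).toNat)) by omega,
            List.range_add, List.map_append, List.sum_append]
          have hz : (List.map (fun k => ((pvP l lo).map (fun r => pvE s.toList (x - lo).toNat k r)).sum)
              ((List.range (s.toList.length - (pvM l lo - (x - lo).toNat))).map
                (fun j => pvM l lo - (x - lo).toNat + j))).sum = 0 := by
            apply List.sum_eq_zero
            intro v hv
            simp only [List.map_map, List.mem_map, List.mem_range, Function.comp_def] at hv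
            obtain ⟨jj, hjj, rfl⟩ := hv
            apply List.sum_eq_zero
            intro u hu
            simp only [List.mem_map] at hu
            obtain ⟨r, hr, rfl⟩ := hu
            unfold pvE
            rw [if_neg]
            rintro ⟨hcne, hceq⟩
            rw [List.getD_eq_default _ _ (by have := hrow r hr; omega)] at hceq
            exact hcne hceq.symm
          rw [hz, add_zero]
      rw [hext]
      apply congrArg
      apply List.map_congr_left
      intro k hk
      simp only [List.mem_range] at hk
      unfold pvP
      rw [List.map_map]
      have hsplit : (List.map ((fun r => pvE s.toList (x - lo).toNat k r)
            ∘ fun ab => List.replicate (ab.1 - lo).toNat ' ' ++ ab.2.toList) l)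
          = List.map (fun ab2 : Int × String => if s.toList.getD k ' ' ≠ ' '
              then (((PySem.List.enumerate ab2.2.toList).map (fun kc => (ab2.1 + kc.1, kc.2))).count
                (x + (k : Int), s.toList.getD k ' ') : Int) else 0) l := by
        apply List.map_congr_left
        intro ab2 hab2
        have hla : lo ≤ ab2.1 :=
          PySem.List.min?_isMin hlo ab2.1 (List.mem_map_of_mem hab2)
        exact pv_cell s.toList ab2.2.toList lo ab2.1 x k hla hli
      rw [hsplit]
      by_cases hc : s.toList.getD k ' ' = ' '
      · rw [if_neg (by simp only [ne_eq, not_not]; exact hc)]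
        apply List.sum_eq_zero
        intro v hv
        simp only [List.mem_map] at hv
        obtain ⟨ab2, hab2, rfl⟩ := hv
        rw [if_neg (by simp only [ne_eq, not_not]; exact hc)]
      · rw [if_pos hc]
        have := pv_count_flatMap l
          (fun ab2 => (PySem.List.enumerate ab2.2.toList).map (fun kc => (ab2.1 + kc.1, kc.2)))
          (x + (k : Int), s.toList.getD k ' ')
        rw [show pvKeys l = l.flatMap
            (fun ab2 => (PySem.List.enumerate ab2.2.toList).map (fun kc => (ab2.1 + kc.1, kc.2)))
          from rfl, this]
        apply congrArg
        apply List.map_congr_left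
        intro ab2 _
        rw [if_pos hc]
    rw [hA, hB]


-- ===== VERDICT (by name: the statement is the Claim_ definition above) =====
theorem find_alignment_index_py_spec : Claim_equal_find_alignment_index_py := by
  intro l s _
  show _ = _
  exact pv_main l s
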